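-- pv_equiv track=rewrite | github.com/sapkotagaurav/Misson | squareofeven.py | sqeven
-- ===== SOURCE A (Python) =====
-- def rev_num(num):
--     n2=0
--     while(num>0):
--         n2 = n2*10 +(num%10)
--         num = int(num/10)
--     return n2
--
-- def sqeven(num):
--     n2 = rev_num(num)
--     n = 0
--     x =0
--     while(n2>0):
--         n +=1
--         if (n%2==0):
--             x = x + (n2%10)**2
--         n2=int(n2/10)
--     return x
-- ===== SOURCE B (Python) =====
-- def sqeven(num):
--     if num <= 0:
--         return 0
--     ds = []
--     while num > 0:
--         ds.append(num % 10)
--         num //= 10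
--     L = len(ds)
--     return sum(d * d for i, d in enumerate(ds) if (L - i) % 2 == 0)
-- ===== Notes on version B (the rewrite author's own statement) =====
-- stated objective: simpler
-- what changed: B drops A's digit-reversal pass entirely: it extracts the digit list in a single pass and sums d*d over digits at even positions counted from the most-significant side, instead of reversing the number and re-scanning it with a running position counter.
import Mathlib
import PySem

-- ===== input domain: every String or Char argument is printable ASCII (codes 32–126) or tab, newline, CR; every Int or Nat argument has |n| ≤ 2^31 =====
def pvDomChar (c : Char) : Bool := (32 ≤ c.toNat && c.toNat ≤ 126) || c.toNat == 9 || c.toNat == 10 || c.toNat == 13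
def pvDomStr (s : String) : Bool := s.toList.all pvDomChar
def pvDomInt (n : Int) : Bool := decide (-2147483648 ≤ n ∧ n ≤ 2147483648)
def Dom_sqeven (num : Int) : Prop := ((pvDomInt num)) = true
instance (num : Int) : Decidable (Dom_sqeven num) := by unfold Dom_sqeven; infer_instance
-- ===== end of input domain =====

-- B replaces A's digit-reversal pass + positional scan by one digit-extraction pass and a
-- comprehension keyed on position parity from the most-significant side (objective: simpler).

-- termination helpers for the ports (cited by name in decreasing_by)
theorem pv_trunc10_toNat_lt (num : Int) (h : 0 < num) :
    (PySem.Int.truncdiv num 10).toNat < num.toNat := by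
  have hc : ∀ m : Nat, PySem.Int.truncdiv ((m : Nat) : Int) 10 = ((m / 10 : Nat) : Int) := by
    intro m; simp [PySem.Int.truncdiv]
  have hm : num = ((num.toNat : Nat) : Int) := (Int.toNat_of_nonneg (le_of_lt h)).symm
  rw [hm, hc num.toNat, Int.toNat_natCast, Int.toNat_natCast]
  exact Nat.div_lt_self (by omega) (by norm_num)

theorem pv_floordiv10_toNat_lt (n : Int) (h : 0 < n) :
    (PySem.Int.floordiv n 10).toNat < n.toNat := by
  have hc : ∀ m : Nat, PySem.Int.floordiv ((m : Nat) : Int) 10 = ((m / 10 : Nat) : Int) := by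
    intro m
    have := PySem.Int.floordiv_natCast m 10
    rw [show ((10:Nat):Int) = (10:Int) by norm_num] at this
    exact this
  have hm : n = ((n.toNat : Nat) : Int) := (Int.toNat_of_nonneg (le_of_lt h)).symm
  rw [hm, hc n.toNat, Int.toNat_natCast, Int.toNat_natCast]
  exact Nat.div_lt_self (by omega) (by norm_num)

-- ===== PORT A =====
-- while num > 0: n2 = n2*10 + num%10; num = int(num/10)   (int(num/10) is exact truncating division on Dom)
def revNumAux (num n2 : Int) : Int :=
  if h : 0 < num then revNumAux (PySem.Int.truncdiv num 10) (n2 * 10 + PySem.Int.mod num 10) else n2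
  termination_by num.toNat
  decreasing_by exact pv_trunc10_toNat_lt num h

def rev_num (num : Int) : Int := revNumAux num 0

-- while n2 > 0: n += 1; if n%2==0: x += (n2%10)**2; n2 = int(n2/10)
def sqevenLoop (n2 n x : Int) : Int :=
  if h : 0 < n2 then
    sqevenLoop (PySem.Int.truncdiv n2 10) (n + 1)
      (if PySem.Int.mod (n + 1) 2 = 0 then x + (PySem.Int.mod n2 10) ^ 2 else x)
  else x
  termination_by n2.toNat
  decreasing_by exact pv_trunc10_toNat_lt n2 h

def sqeven (num : Int) : Int := sqevenLoop (rev_num num) 0 0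

-- ===== PORT B =====
-- while num > 0: ds.append(num % 10); num //= 10
def digitsLoop (n : Int) (ds : List Int) : List Int :=
  if h : 0 < n then digitsLoop (PySem.Int.floordiv n 10) (ds ++ [PySem.Int.mod n 10]) else ds
  termination_by n.toNat
  decreasing_by exact pv_floordiv10_toNat_lt n h

def sqeven_alt (num : Int) : Int :=
  if num ≤ 0 then 0
  else
    let ds := digitsLoop num []
    let L : Int := ds.length
    (((PySem.List.enumerate ds).filter (fun p => PySem.Int.mod (L - p.1) 2 == 0)).map
      (fun p => p.2 * p.2)).sum

-- ===== PRECONDITION & SPEC =====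
def Spec_sqeven (num : Int) (out : Int) : Prop := out = sqeven_alt num
instance (num : Int) (out : Int) : Decidable (Spec_sqeven num out) := by unfold Spec_sqeven; infer_instance

-- ===== CLAIM (what is proved, stated in full; the proofs are below) =====
def Claim_equal_sqeven : Prop := ∀ (num : Int), Dom_sqeven num → Spec_sqeven num (sqeven num)

-- ===== LEMMAS AND PROOFS =====

-- cast bridges for the loop steps
theorem pv_trunc10_cast (m : Nat) : PySem.Int.truncdiv (m : Int) 10 = ((m / 10 : Nat) : Int) := by
  simp [PySem.Int.truncdiv]

theorem pv_floordiv10_cast (m : Nat) : PySem.Int.floordiv (m : Int) 10 = ((m / 10 : Nat) : Int) := by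
  have := PySem.Int.floordiv_natCast m 10
  rw [show ((10:Nat):Int) = (10:Int) by norm_num] at this
  exact this

theorem pv_mod10_cast (m : Nat) : PySem.Int.mod (m : Int) 10 = ((m % 10 : Nat) : Int) := by
  have := PySem.Int.mod_natCast m 10
  rw [show ((10:Nat):Int) = (10:Int) by norm_num] at this
  exact this

-- the Int digit list of m, least-significant digit first
def DL (m : Nat) : List Int := (Nat.digits 10 m).map (fun d => (d : Int))

theorem DL_step (m : Nat) (hm : 0 < m) : DL m = ((m % 10 : Nat) : Int) :: DL (m / 10) := by
  unfold DL
  rw [Nat.digits_def' (by norm_num : 1 < 10) hm]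
  simp

-- sum of d^2 over the entries of l whose (n + 1 + index) is even (A's running-counter sum)
def hsum : List Int → Int → Int
  | [], _ => 0
  | d :: t, n => (if PySem.Int.mod (n + 1) 2 = 0 then d ^ 2 else 0) + hsum t (n + 1)

-- Nat mirror of A's reversal loop
def revN (m a : Nat) : Nat :=
  if h : 0 < m then revN (m / 10) (a * 10 + m % 10) else a
  termination_by m
  decreasing_by exact Nat.div_lt_self h (by norm_num)

theorem revNumAux_eq (m a : Nat) : revNumAux (m : Int) (a : Int) = ((revN m a : Nat) : Int) := by
  induction m using Nat.strong_induction_on generalizing a with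
  | _ m IH =>
    rw [revNumAux, revN]
    by_cases hm : 0 < m
    · have hmI : (0 : Int) < (m : Int) := by exact_mod_cast hm
      rw [dif_pos hmI, dif_pos hm, pv_trunc10_cast, pv_mod10_cast]
      rw [show ((a : Int) * 10 + ((m % 10 : Nat) : Int)) = ((a * 10 + m % 10 : Nat) : Int) by push_cast; ring]
      exact IH (m / 10) (Nat.div_lt_self hm (by norm_num)) _
    · have hmI : ¬ (0 : Int) < (m : Int) := by exact_mod_cast hm
      rw [dif_neg hmI, dif_neg hm]

theorem sqevenLoop_eq (m : Nat) : ∀ (n x : Int), sqevenLoop (m : Int) n x = x + hsum (DL m) n := by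
  induction m using Nat.strong_induction_on with
  | _ m IH =>
    intro n x
    rw [sqevenLoop]
    by_cases hm : 0 < m
    · have hmI : (0 : Int) < (m : Int) := by exact_mod_cast hm
      rw [dif_pos hmI, pv_trunc10_cast, pv_mod10_cast,
        IH (m / 10) (Nat.div_lt_self hm (by norm_num)) (n + 1), DL_step m hm, hsum]
      split_ifs <;> ring
    · have hmI : ¬ (0 : Int) < (m : Int) := by exact_mod_cast hm
      rw [dif_neg hmI]
      have : m = 0 := by omega
      subst this
      simp [DL, hsum]

theorem DL_revN (m : Nat) : ∀ a : Nat, 1 ≤ a →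
    DL (revN m a) = (DL m).reverse ++ DL a := by
  induction m using Nat.strong_induction_on with
  | _ m IH =>
    intro a ha
    rw [revN]
    by_cases hm : 0 < m
    · rw [dif_pos hm]
      have ha' : 1 ≤ a * 10 + m % 10 := by omega
      rw [IH (m / 10) (Nat.div_lt_self hm (by norm_num)) _ ha']
      have hstep : DL (a * 10 + m % 10) = ((m % 10 : Nat) : Int) :: DL a := by
        unfold DL
        rw [Nat.digits_def' (by norm_num : 1 < 10) (by omega)]
        have h1 : (a * 10 + m % 10) % 10 = m % 10 := by omega
        have h2 : (a * 10 + m % 10) / 10 = a := by omega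
        rw [h1, h2]
        simp
      rw [hstep, DL_step m hm]
      simp
    · rw [dif_neg hm]
      have : m = 0 := by omega
      subst this
      simp [DL]

theorem hsum_append_single (l : List Int) (d : Int) : ∀ n : Int,
    hsum (l ++ [d]) n = hsum l n + (if PySem.Int.mod (n + (l.length : Int) + 1) 2 = 0 then d ^ 2 else 0) := by
  induction l with
  | nil => intro n; simp [hsum]
  | cons e t IH =>
    intro n
    simp only [List.cons_append, hsum, IH (n + 1), List.length_cons]
    have : (n + 1) + (t.length : Int) + 1 = n + ((t.length + 1 : Nat) : Int) + 1 := by push_cast; ring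
    rw [this]
    ring_nf

theorem hsum_revN_zero (m : Nat) : ∀ n : Int, hsum (DL (revN m 0)) n = hsum (DL m).reverse n := by
  induction m using Nat.strong_induction_on with
  | _ m IH =>
    intro n
    rw [revN]
    by_cases hm : 0 < m
    · rw [dif_pos hm]
      have hlt := Nat.div_lt_self hm (by norm_num : 1 < 10)
      have h0 : (0 * 10 + m % 10 : Nat) = m % 10 := by omega
      rw [h0]
      by_cases hr : m % 10 = 0
      · rw [hr, IH (m / 10) hlt n, DL_step m hm, hr]
        simp only [Nat.cast_zero, List.reverse_cons]
        rw [hsum_append_single]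
        split_ifs <;> ring
      · have ha : 1 ≤ m % 10 := by omega
        rw [DL_revN (m / 10) _ ha]
        have hd : DL (m % 10) = [((m % 10 : Nat) : Int)] := by
          unfold DL
          have h1 : (m % 10) % 10 = m % 10 := by omega
          have h2 : (m % 10) / 10 = 0 := by omega
          rw [Nat.digits_def' (by norm_num : 1 < 10) (by omega), h1, h2]
          simp
        rw [hd, DL_step m hm]
        simp
    · rw [dif_neg hm]
      have : m = 0 := by omega
      subst this
      simp [DL]

theorem enum_filter_sum (C : Int) (l : List Int) : ∀ s : Int,
    (((PySem.List.enumerate l s).filter (fun p => PySem.Int.mod (C - p.1) 2 == 0)).map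
        (fun p => p.2 * p.2)).sum
      = hsum l.reverse (C - s - (l.length : Int)) := by
  induction l with
  | nil => intro s; simp [PySem.List.enumerate_nil, hsum]
  | cons d t IH =>
    intro s
    rw [PySem.List.enumerate_cons, List.reverse_cons, hsum_append_single]
    have hlen : (((d :: t).length : Nat) : Int) = (t.length : Int) + 1 := by
      push_cast [List.length_cons]; ring
    have hn0 : C - s - ((t.length : Int) + 1) + (t.reverse.length : Int) + 1 = C - s := by
      push_cast [List.length_reverse]; ring
    rw [hlen, hn0]
    have hIH := IH (s + 1)
    have hIH' : (((PySem.List.enumerate t (s + 1)).filter (fun p => PySem.Int.mod (C - p.1) 2 == 0)).map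
        (fun p => p.2 * p.2)).sum = hsum t.reverse (C - s - ((t.length : Int) + 1)) := by
      rw [hIH]; ring_nf
    by_cases hc : PySem.Int.mod (C - s) 2 = 0
    · rw [List.filter_cons, if_pos (by simpa using hc), List.map_cons, List.sum_cons, hIH',
        if_pos hc]
      ring
    · rw [List.filter_cons, if_neg (by simpa using hc), hIH', if_neg hc]
      ring_nf

theorem digitsLoop_eq (m : Nat) : ∀ ds : List Int, digitsLoop (m : Int) ds = ds ++ DL m := by
  induction m using Nat.strong_induction_on with
  | _ m IH =>
    intro ds
    rw [digitsLoop]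
    by_cases hm : 0 < m
    · have hmI : (0 : Int) < (m : Int) := by exact_mod_cast hm
      rw [dif_pos hmI, pv_floordiv10_cast, pv_mod10_cast,
        IH (m / 10) (Nat.div_lt_self hm (by norm_num)) _, DL_step m hm]
      simp
    · have hmI : ¬ (0 : Int) < (m : Int) := by exact_mod_cast hm
      rw [dif_neg hmI]
      have : m = 0 := by omega
      subst this
      simp [DL]

-- ===== VERDICT (by name: the statement is the Claim_ definition above) =====
theorem sqeven_spec : Claim_equal_sqeven := by
  intro num _
  unfold Spec_sqeven
  by_cases h : num ≤ 0
  · have h0 : ¬ (0 : Int) < num := by omega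
    rw [sqeven, rev_num, revNumAux, dif_neg h0, sqevenLoop, dif_neg (by omega : ¬ (0:Int) < 0),
      sqeven_alt, if_pos h]
  · have hpos : 0 < num := by omega
    have hm : num = ((num.toNat : Nat) : Int) := (Int.toNat_of_nonneg (le_of_lt hpos)).symm
    have hrev : rev_num num = ((revN num.toNat 0 : Nat) : Int) := by
      rw [rev_num, hm]; exact_mod_cast revNumAux_eq num.toNat 0
    have hds : digitsLoop num [] = DL num.toNat := by
      rw [hm, digitsLoop_eq num.toNat [], List.nil_append, Int.toNat_natCast]
    rw [sqeven, hrev, sqevenLoop_eq, hsum_revN_zero, sqeven_alt, if_neg h]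
    simp only [hds]
    rw [enum_filter_sum ((DL num.toNat).length : Int) (DL num.toNat) 0]
    simp
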